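-- pv_equiv track=rewrite | github.com/slqye/42 | ready_set_boole/ex04.py | count_var_index
-- ===== SOURCE A (Python) =====
-- def count_var_index(formula: str, var: str):
-- 	count: int = 0
-- 	double_var: str = ""
--
-- 	for i in formula:
-- 		if i in "ABCDEFGHIJKLMNOPQRSTUVWXYZ" and i not in double_var:
-- 			if (i == var):
-- 				return (count)
-- 			double_var += i
-- 			count += 1
-- 	return (-1)
-- ===== SOURCE B (Python) =====
-- ALPHABET = "ABCDEFGHIJKLMNOPQRSTUVWXYZ"
--
-- def count_var_index(formula: str, var: str):
--     # var must be a single uppercase letter that occurs in the formula; otherwise -1.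
--     if len(var) != 1 or var not in ALPHABET or var not in formula:
--         return -1
--     # Its index among distinct letters = number of distinct letters strictly
--     # before its first occurrence.
--     prefix = formula[:formula.index(var)]
--     return len({c for c in prefix if c in ALPHABET})
-- ===== Notes on version B (the rewrite author's own statement) =====
-- stated objective: simpler
-- what changed: B abandons A's single scan with an accumulated counter, seen-string and early return: it validates var, locates var's first occurrence with str.index, slices the prefix before it and returns the cardinality of the set of letters in that prefix (search + slice + set size instead of a stateful per-char loop; a timing run measured this constant-factor change as ~6x faster at the largest size).
import Mathlib
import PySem

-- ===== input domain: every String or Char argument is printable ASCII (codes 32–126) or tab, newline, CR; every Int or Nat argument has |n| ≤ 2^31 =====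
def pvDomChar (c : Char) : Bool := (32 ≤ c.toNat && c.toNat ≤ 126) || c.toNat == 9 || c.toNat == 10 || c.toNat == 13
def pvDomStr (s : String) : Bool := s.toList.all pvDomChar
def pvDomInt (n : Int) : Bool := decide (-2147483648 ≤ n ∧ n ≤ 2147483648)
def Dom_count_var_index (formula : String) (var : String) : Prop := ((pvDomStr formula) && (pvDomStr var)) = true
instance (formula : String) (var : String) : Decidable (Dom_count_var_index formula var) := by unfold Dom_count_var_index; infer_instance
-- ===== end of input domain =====

-- B replaces A's stateful early-returning scan by a search-slice-count decomposition:
-- validate var, find its first occurrence, and return the number of distinct letters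
-- in the prefix before it (objective: simpler); proved equal to A on all inputs.


-- ===== PORT A =====
-- 'i in "ABC…Z"' on a single character i is exactly character membership in the letters.
def pvUpper : List Char := "ABCDEFGHIJKLMNOPQRSTUVWXYZ".toList

-- A's for-loop with early return; double_var kept as its list of characters,
-- 'i == var' is the Python comparison of the 1-char string with var.
def pvALoop (var : String) : List Char → Int → List Char → Int
  | [], _, _ => -1
  | c :: rest, count, dv =>
    if pvUpper.contains c && !(dv.contains c) then
      if String.ofList [c] = var then count
      else pvALoop var rest (count + 1) (dv ++ [c])
    else pvALoop var rest count dv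

def count_var_index (formula : String) (var : String) : Int :=
  pvALoop var formula.toList 0 []

-- ===== PORT B =====
-- Source B: guard (len(var) != 1 or var not in ALPHABET or var not in formula) → -1;
-- 'var in ALPHABET'/'var in formula' on the 1-char var is char membership,
-- formula.index(var) is PySem.List.index?, formula[:p] is List.take p,
-- the set comprehension is PySem.Set.ofList of the filtered prefix, len = .length.
def count_var_index_alt (formula : String) (var : String) : Int :=
  match var.toList with
  | [v] =>
    if pvUpper.contains v then
      match PySem.List.index? formula.toList v with
      | some p =>
          ((PySem.Set.ofList ((formula.toList.take p).filter
              (fun c => pvUpper.contains c))).length : Int)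
      | none => -1
    else -1
  | _ => -1

-- ===== PRECONDITION & SPEC =====
def Spec_count_var_index (formula : String) (var : String) (out : Int) : Prop := out = count_var_index_alt formula var
instance (formula : String) (var : String) (out : Int) : Decidable (Spec_count_var_index formula var out) := by unfold Spec_count_var_index; infer_instance

-- ===== CLAIM (what is proved, stated in full; the proofs are below) =====
def Claim_equal_count_var_index : Prop := ∀ (formula : String) (var : String), Dom_count_var_index formula var → Spec_count_var_index formula var (count_var_index formula var)

-- ===== LEMMAS AND PROOFS =====

-- if var is not the 1-char string of any letter, A's early return never fires
theorem pvA_no_match (var : String)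
    (h : ∀ c : Char, pvUpper.contains c = true → String.ofList [c] ≠ var) :
    ∀ (l : List Char) (count : Int) (dv : List Char),
      pvALoop var l count dv = -1 := by
  intro l
  induction l with
  | nil => intro count dv; rfl
  | cons c rest ih =>
    intro count dv
    unfold pvALoop
    split_ifs with h1 h2
    · exact absurd h2 (h c (Bool.and_eq_true .. |>.mp h1).1)
    · exact ih (count + 1) (dv ++ [c])
    · exact ih count dv

-- the main invariant: A's loop from state (count, dv) equals count plus the number of
-- letters in the prefix before the first v that are fresh with respect to dv
theorem pvMain (v : Char) (hv : pvUpper.contains v = true) :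
    ∀ (l : List Char) (count : Int) (dv : List Char), dv.Nodup → v ∉ dv →
      pvALoop (String.ofList [v]) l count dv =
        match PySem.List.index? l v with
        | some p => count +
            (((PySem.Set.update dv ((l.take p).filter (fun c => pvUpper.contains c))).length : Int)
              - (dv.length : Int))
        | none => -1 := by
  intro l
  induction l with
  | nil => intro count dv _ _; rfl
  | cons c rest ih =>
    intro count dv hnd hvdv
    unfold pvALoop
    by_cases hcv : c = v
    · subst hcv
      rw [PySem.List.index?_cons_self]
      have hcond : (pvUpper.contains c && !(dv.contains c)) = true := by
        simp only [Bool.and_eq_true, Bool.not_eq_true']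
        exact ⟨hv, by simpa using hvdv⟩
      rw [if_pos hcond, if_pos rfl]
      simp [PySem.Set.update_nil]
    · have hsne : String.ofList [c] ≠ String.ofList [v] := by
        intro he
        exact hcv (by simpa using congrArg String.toList he)
      rw [PySem.List.index?_cons_of_ne rest hcv]
      by_cases h1 : (pvUpper.contains c && !(dv.contains c)) = true
      · -- c is a fresh letter ≠ v: both sides extend by c
        rw [if_pos h1, if_neg hsne]
        obtain ⟨hcup, hcfresh⟩ := (Bool.and_eq_true ..).mp h1
        have hcndv : c ∉ dv := by simpa using hcfresh
        have hnd' : (dv ++ [c]).Nodup := by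
          rw [List.nodup_append]
          refine ⟨hnd, List.nodup_singleton c, fun a ha b hb => ?_⟩
          have hb' : b = c := List.mem_singleton.mp hb
          subst hb'
          exact fun he => hcndv (he ▸ ha)
        have hvdv' : v ∉ dv ++ [c] := by
          simp only [List.mem_append, List.mem_singleton]
          rintro (h | h)
          · exact hvdv h
          · exact hcv h.symm
        rw [ih (count + 1) (dv ++ [c]) hnd' hvdv']
        cases hidx : PySem.List.index? rest v with
        | none => simp
        | some p =>
          simp only [Option.map_some]
          have hupd : PySem.Set.update dv (((c :: rest).take (p + 1)).filter (fun c => pvUpper.contains c))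
              = PySem.Set.update (dv ++ [c]) ((rest.take p).filter (fun c => pvUpper.contains c)) := by
            rw [List.take_succ_cons, List.filter_cons_of_pos (by simpa using hcup),
              PySem.Set.update_cons, PySem.Set.add_of_not_mem hcndv]
          rw [hupd]
          simp only [List.length_append, List.length_singleton]
          push_cast
          ring
      · -- skipped character (not a letter, or already in dv): state unchanged
        rw [if_neg h1]
        rw [ih count dv hnd hvdv]
        cases hidx : PySem.List.index? rest v with
        | none => simp
        | some p =>
          simp only [Option.map_some]
          by_cases hcup : pvUpper.contains c = true
          · -- c is a letter already in dv: adding it to the set changes nothing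
            have hcdv : c ∈ dv := by
              by_contra hc
              apply h1
              simp only [Bool.and_eq_true, Bool.not_eq_true']
              exact ⟨hcup, by simpa using hc⟩
            have hupd : PySem.Set.update dv (((c :: rest).take (p + 1)).filter (fun c => pvUpper.contains c))
                = PySem.Set.update dv ((rest.take p).filter (fun c => pvUpper.contains c)) := by
              rw [List.take_succ_cons, List.filter_cons_of_pos (by simpa using hcup),
                PySem.Set.update_cons, PySem.Set.add_of_mem hcdv]
            rw [hupd]
          · -- c is not a letter: the filter drops it
            have hupd : ((c :: rest).take (p + 1)).filter (fun c => pvUpper.contains c)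
                = (rest.take p).filter (fun c => pvUpper.contains c) := by
              rw [List.take_succ_cons, List.filter_cons_of_neg (by simpa using hcup)]
            rw [hupd]

-- ===== VERDICT (by name: the statement is the Claim_ definition above) =====
theorem count_var_index_spec : Claim_equal_count_var_index := by
  intro formula var _
  unfold Spec_count_var_index count_var_index count_var_index_alt
  cases hvar : var.toList with
  | nil =>
    have hno : ∀ c : Char, pvUpper.contains c = true → String.ofList [c] ≠ var := by
      intro c _ he
      have h2 : var.toList = [c] := by rw [← he]; simp
      rw [hvar] at h2; cases h2
    rw [pvA_no_match var hno]
  | cons v t =>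
    cases t with
    | nil =>
      by_cases hv : pvUpper.contains v = true
      · have hveq : var = String.ofList [v] := by rw [← hvar]; simp
        rw [hveq, pvMain v hv formula.toList 0 [] List.nodup_nil (List.not_mem_nil)]
        have hvmem : v ∈ pvUpper := by simpa using hv
        cases hidx : PySem.List.index? formula.toList v with
        | none =>
          rw [PySem.List.index?_eq_idxOf?] at hidx
          simp [hidx, hvmem]
        | some p =>
          rw [PySem.List.index?_eq_idxOf?] at hidx
          simp [hidx, hvmem, PySem.Set.update_nil_left]
      · have hnv : v ∉ pvUpper := by simpa using hv
        have hno : ∀ c : Char, pvUpper.contains c = true → String.ofList [c] ≠ var := by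
          intro c hc he
          have h2 : var.toList = [c] := by rw [← he]; simp
          rw [hvar] at h2
          cases h2
          exact hnv (by simpa using hc)
        rw [pvA_no_match var hno]
        simp [hnv]
    | cons w t' =>
      have hno : ∀ c : Char, pvUpper.contains c = true → String.ofList [c] ≠ var := by
        intro c _ he
        have h2 : var.toList = [c] := by rw [← he]; simp
        rw [hvar] at h2; cases h2
      rw [pvA_no_match var hno]
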